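-- pv_equiv track=rewrite | github.com/Coding-Capybara/CodingTestWinner | programmers/42895/c7c4ff.py | solution
-- ===== SOURCE A (Python) =====
-- def solution(N, number):
--     answer = -1
--
--     dp = []
--
--     for i in range(1, 9):
--         cases = set()
--         cases.add(int(str(N) * i))
--
--         for j in range(0, i-1):
--             for operator in dp[j]:
--                 for operator2 in dp[-j-1]:
--                     cases.add(operator + operator2)
--                     cases.add(operator - operator2)
--                     cases.add(operator * operator2)
--                     if operator2 != 0:
--                         cases.add(operator // operator2)
--
--
--         dp.append(cases)
--
--         if number in cases:
--             answer = i
--             break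
--
--     return answer
-- ===== SOURCE B (Python) =====
-- def solution(N, number):
--     cache = {}
--
--     def f(k):
--         if k in cache:
--             return cache[k]
--         vals = {int(str(N) * k)}
--         for m in range(1, k):
--             fa = f(m)
--             fb = f(k - m)
--             for a in fa:
--                 for b in fb:
--                     vals.add(a + b)
--                     vals.add(a - b)
--                     vals.add(a * b)
--                     if b != 0:
--                         vals.add(a // b)
--         cache[k] = vals
--         return vals
--
--     for i in range(1, 9):
--         if number in f(i):
--             return i
--     return -1
-- ===== Notes on version B (the rewrite author's own statement) =====
-- stated objective: alternative
-- what changed: Replaces A's bottom-up dp list with its dp[j]/dp[-j-1] negative-index pairing by a memoized top-down recursion f(k) over splits m=1..k-1, returning the first i in 1..8 with number in f(i).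
import Mathlib
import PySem

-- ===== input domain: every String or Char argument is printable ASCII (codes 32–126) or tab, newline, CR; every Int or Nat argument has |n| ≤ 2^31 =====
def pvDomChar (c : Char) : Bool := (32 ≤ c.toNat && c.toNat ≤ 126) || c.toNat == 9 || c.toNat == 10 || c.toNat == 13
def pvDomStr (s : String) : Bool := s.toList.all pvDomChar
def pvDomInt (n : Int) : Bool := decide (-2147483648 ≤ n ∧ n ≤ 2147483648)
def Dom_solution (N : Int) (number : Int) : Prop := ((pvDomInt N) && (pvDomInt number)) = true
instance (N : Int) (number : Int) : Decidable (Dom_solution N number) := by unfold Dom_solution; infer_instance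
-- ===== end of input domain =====

-- B replaces A's bottom-up dp list (indexed dp[j] / dp[-j-1]) by a memoized top-down
-- recursion f(k) over the same recurrence; same return value, objective: alternative.
-- Python's 'set' is ported as Std.HashSet Int (a hash set, as in CPython): the sets are
-- internal, consumed only through membership and set-building, so the result does not
-- depend on iteration order (a list-backed set is quadratically slower to evaluate).

-- ===== PORT A =====

-- str(N) * i  (Python string repetition, i ∈ [1,8] here)
def pyStrMul (s : String) (i : Int) : String :=
  (List.range i.toNat).foldl (fun acc _ => acc ++ s) ""

-- int(str(N) * i); Python raises ValueError when the parse fails (N < 0, i ≥ 2) —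
-- those inputs are outside Pre_solution, the .getD 0 there is never the claimed value
def pyRepConcat (N : Int) (i : Int) : Int :=
  (PySem.Int.ofStr? (pyStrMul (PySem.Int.toStr N) i)).getD 0

-- one iteration of A's outer loop: build `cases` for this i from the dp list
def aCases (N : Int) (i : Int) (dp : List (Std.HashSet Int)) : Std.HashSet Int :=
  (PySem.List.pyRange 0 (i-1) 1).foldl (fun cs j =>
    (Std.HashSet.toList ((PySem.List.pyGet? dp j).getD ∅)).foldl (fun cs a =>
      (Std.HashSet.toList ((PySem.List.pyGet? dp (-j-1)).getD ∅)).foldl (fun cs b =>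
        let cs := Std.HashSet.insert cs (a + b)
        let cs := Std.HashSet.insert cs (a - b)
        let cs := Std.HashSet.insert cs (a * b)
        if b ≠ 0 then Std.HashSet.insert cs (PySem.Int.floordiv a b) else cs) cs) cs)
    (Std.HashSet.insert ∅ (pyRepConcat N i))

-- A's outer loop: 'for i in range(1, 9): … dp.append(cases); if number in cases: break'
def aLoop (N number : Int) : List Int → List (Std.HashSet Int) → Int
  | [], _ => -1
  | i :: rest, dp =>
    let cases := aCases N i dp
    if Std.HashSet.contains cases number then i
    else aLoop N number rest (dp ++ [cases])

def solution (N : Int) (number : Int) : Int :=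
  aLoop N number (PySem.List.pyRange 1 9 1) []

-- ===== PORT B =====

-- B's recursive helper f(k): values reachable with exactly k copies of N
-- (Source B's cache only memoizes the calls; the value is this recursion)
def fB (N : Int) : (k : Nat) → Std.HashSet Int
  | k =>
    (List.range (k-1)).attach.foldl
      (fun vals m =>
        let fa := fB N (m.1 + 1)
        let fb := fB N (k - (m.1 + 1))
        fa.toList.foldl (fun vals a =>
          fb.toList.foldl (fun vals b =>
            let vals := Std.HashSet.insert vals (a + b)
            let vals := Std.HashSet.insert vals (a - b)
            let vals := Std.HashSet.insert vals (a * b)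
            if b ≠ 0 then Std.HashSet.insert vals (PySem.Int.floordiv a b) else vals) vals) vals)
      (Std.HashSet.insert ∅ (pyRepConcat N k))
  termination_by k => k
  decreasing_by
    · have hm := m.2; simp [List.mem_range] at hm; omega
    · have hm := m.2; simp [List.mem_range] at hm; omega

-- B's main loop: first i in 1..8 with number ∈ f(i), else -1
def bFind (N number : Int) : List Nat → Int
  | [] => -1
  | i :: rest =>
    if Std.HashSet.contains (fB N i) number then (i : Int) else bFind N number rest

def solution_alt (N : Int) (number : Int) : Int :=
  bFind N number ((List.range 8).map (fun t => t + 1))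

-- ===== PRECONDITION & SPEC =====
-- Pre_ excludes exactly the inputs where Python A raises ValueError (negative N not
-- found at i = 1: int(str(N)*2) is then not parseable); B raises there identically.
def Pre_solution (N : Int) (number : Int) : Prop := 0 ≤ N ∨ number = N
instance (N : Int) (number : Int) : Decidable (Pre_solution N number) := by unfold Pre_solution; infer_instance
def pvWitness_solution : Int × Int := (5, 12)

def Spec_solution (N : Int) (number : Int) (out : Int) : Prop := out = solution_alt N number
instance (N : Int) (number : Int) (out : Int) : Decidable (Spec_solution N number out) := by unfold Spec_solution; infer_instance

-- ===== CLAIM (what is proved, stated in full; the proofs are below) =====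
def Claim_equal_solution : Prop := ∀ (N : Int) (number : Int), Dom_solution N number → Pre_solution N number → Spec_solution N number (solution N number)

-- ===== LEMMAS AND PROOFS =====

-- the dp list after n completed iterations of A's loop is [f(1), …, f(n)]
def dpList (N : Int) (n : Nat) : List (Std.HashSet Int) :=
  (List.range n).map (fun t => fB N (t + 1))

theorem dpList_get (N : Int) (n j : Nat) (h : j < n) :
    PySem.List.pyGet? (dpList N n) (j : Int) = some (fB N (j + 1)) := by
  simp [dpList, h]

theorem dpList_length (N : Int) (n : Nat) : (dpList N n).length = n := by
  simp [dpList]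

theorem dpList_get_neg (N : Int) (n j : Nat) (h : j < n) :
    PySem.List.pyGet? (dpList N n) (-(j : Int) - 1) = some (fB N (n - j)) := by
  have h1 : -(j : Int) - 1 = -((j + 1 : Nat) : Int) := by push_cast; ring
  rw [h1, PySem.List.pyGet?_neg_natCast (dpList N n) (j + 1) (by omega)
        (by rw [dpList_length]; omega)]
  rw [dpList_length]
  have h2 : n - (j + 1) < n := by omega
  simp [dpList, h2]
  congr 1
  omega

-- fold over l.attach whose step only uses the element = plain fold over l
theorem foldl_attach_of_eq {α β : Type} (l : List α) (f : β → α → β)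
    (g : β → {x // x ∈ l} → β) (h : ∀ acc x, g acc x = f acc x.1) (init : β) :
    l.attach.foldl g init = l.foldl f init := by
  have : g = fun acc x => f acc x.1 := by funext acc x; exact h acc x
  rw [this, List.foldl_attach]

-- A's per-iteration set construction over dp = [f(1),…,f(n)] is exactly B's f(n+1)
theorem aCases_eq_fB (N : Int) (n : Nat) :
    aCases N ((n : Int) + 1) (dpList N n) = fB N (n + 1) := by
  rw [fB]
  unfold aCases
  have hr : (n : Int) + 1 - 1 = ((n : Nat) : Int) := by ring
  rw [hr, PySem.List.pyRange_zero_natCast, List.foldl_map]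
  have hc : ((n + 1 : Nat) : Int) = (n : Int) + 1 := by push_cast; ring
  rw [hc, Nat.add_sub_cancel]
  refine (foldl_attach_of_eq (List.range n) _ _ ?_ _).symm
  intro acc x
  obtain ⟨j, hjm⟩ := x
  have hj : j < n := List.mem_range.mp hjm
  simp only [dpList_get N n j hj, dpList_get_neg N n j hj, Option.getD_some,
    Nat.add_sub_add_right]

-- ===== VERDICT (by name: the statement is the Claim_ definition above) =====
theorem solution_spec : Claim_equal_solution := by
  intro N number _ _
  unfold Spec_solution solution solution_alt
  have e1 := aCases_eq_fB N 0
  have e2 := aCases_eq_fB N 1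
  have e3 := aCases_eq_fB N 2
  have e4 := aCases_eq_fB N 3
  have e5 := aCases_eq_fB N 4
  have e6 := aCases_eq_fB N 5
  have e7 := aCases_eq_fB N 6
  have e8 := aCases_eq_fB N 7
  simp only [dpList, List.range_succ, List.range_zero, List.map_append, List.map_cons,
    List.map_nil, List.nil_append, List.append_nil, Nat.cast_ofNat, Nat.cast_zero,
    Nat.cast_one, zero_add] at e1 e2 e3 e4 e5 e6 e7 e8
  norm_num at e1 e2 e3 e4 e5 e6 e7 e8
  show aLoop N number (PySem.List.pyRange 1 9 1) [] = _
  have hrg : PySem.List.pyRange 1 9 1 = [1, 2, 3, 4, 5, 6, 7, 8] := by decide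
  have hrg2 : (List.range 8).map (fun t => t + 1) = [1, 2, 3, 4, 5, 6, 7, 8] := by decide
  rw [hrg, hrg2]
  simp only [aLoop, bFind, List.nil_append, List.cons_append]
  norm_num [e1, e2, e3, e4, e5, e6, e7, e8]
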